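-- pv_equiv track=rewrite | github.com/Feuerkatze/Proekt-1 | module_3_5.py | get_multiplied_digits
-- ===== SOURCE A (Python) =====
-- def get_multiplied_digits(number = 402):
--     str_number = str(number)
--     first= int(str_number[0])
--     if 1< int(len(str_number)):
--         return first * get_multiplied_digits(int(str_number[1:]))
--     elif first != 0:
--         return first
--     else:
--         return 1
-- ===== SOURCE B (Python) =====
-- def get_multiplied_digits(number=402):
--     product = 1
--     n = number
--     while n > 0:
--         digit = n % 10
--         if digit:
--             product *= digit
--         n //= 10
--     return product
-- ===== Notes on version B (the rewrite author's own statement) =====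
-- stated objective: simpler
-- what changed: Replaces A's recursive str()/int() round-tripping (slice the decimal string, re-parse the tail, recurse) with a plain arithmetic loop that multiplies the nonzero digits using modulus and integer division by ten; Pre_ excludes negative numbers, on which A raises ValueError (int of the minus sign).
import Mathlib
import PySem

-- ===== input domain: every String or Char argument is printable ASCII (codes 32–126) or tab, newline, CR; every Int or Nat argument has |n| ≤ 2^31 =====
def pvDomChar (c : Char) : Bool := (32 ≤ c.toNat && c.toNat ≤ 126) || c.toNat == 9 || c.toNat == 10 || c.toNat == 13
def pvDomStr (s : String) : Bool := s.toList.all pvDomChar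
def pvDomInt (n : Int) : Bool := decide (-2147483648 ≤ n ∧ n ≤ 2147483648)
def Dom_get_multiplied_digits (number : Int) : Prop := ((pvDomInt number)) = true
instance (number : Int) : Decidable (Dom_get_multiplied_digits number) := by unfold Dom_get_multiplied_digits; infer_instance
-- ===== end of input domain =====

-- B replaces A's recursive str()/int() round-tripping with a plain arithmetic digit loop (simpler).


-- ===== PORT A =====
-- A only ever applies int() to s[0] and s[1:] of the decimal string str(number) — i.e. to
-- nonempty runs of ASCII digits, or (for number < 0) to strings starting with '-'.
-- pvParseDigits? is EXACT there: some (decimal value) on a nonempty all-digit run,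
-- none (= ValueError) otherwise — the same as Python's int() on every string A feeds it.
def pvDigitVal (c : Char) : Int := (c.toNat : Int) - 48

def pvParseDigits? (cs : List Char) : Option Int :=
  if cs ≠ [] ∧ cs.all Char.isDigit then
    some (cs.foldl (fun a c => 10 * a + pvDigitVal c) 0)
  else none

-- the body of A; fuel = len(str(number)) at the top call, enough for every recursive call
def pvGetA : Nat → Int → Int
  | 0, _ => 0          -- fuel exhausted: unreachable from get_multiplied_digits
  | fuel+1, number =>
    let s := PySem.Int.toChars number                                -- str_number = str(number)
    match PySem.List.pyGet? s 0 with
    | none => 0                                                      -- unreachable: str(n) is never empty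
    | some c =>
      match pvParseDigits? [c] with                                  -- first = int(str_number[0])
      | none => 0                                                    -- ValueError (number < 0): outside Pre_
      | some first =>
        if 1 < PySem.List.len s then                                 -- if 1 < int(len(str_number)):
          match pvParseDigits? (PySem.List.slice s (some 1) none) with  -- int(str_number[1:])
          | none => 0                                                -- unreachable: the tail is all digits
          | some m => first * pvGetA fuel m                          -- first * get_multiplied_digits(...)
        else if first ≠ 0 then first
        else 1

def get_multiplied_digits (number : Int) : Int :=
  pvGetA (PySem.Int.toChars number).length number

-- ===== PORT B =====
def pvAltGo (n : Int) (product : Int) : Int :=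
  if h : 0 < n then
    pvAltGo (PySem.Int.floordiv n 10)
      (if PySem.Int.mod n 10 ≠ 0 then product * PySem.Int.mod n 10 else product)
  else product
termination_by n.toNat
decreasing_by
  rw [PySem.Int.floordiv_eq_ediv_of_pos (by omega)]
  omega

def get_multiplied_digits_alt (number : Int) : Int :=
  pvAltGo number 1

-- ===== PRECONDITION & SPEC =====
-- Pre_ excludes exactly the inputs on which A raises: for number < 0 the first character of
-- str(number) is '-', so first = int(str_number[0]) raises ValueError.
def Pre_get_multiplied_digits (number : Int) : Prop := 0 ≤ number
instance (number : Int) : Decidable (Pre_get_multiplied_digits number) := by unfold Pre_get_multiplied_digits; infer_instance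

def pvWitness_get_multiplied_digits : Int := 402

def Spec_get_multiplied_digits (number : Int) (out : Int) : Prop := out = get_multiplied_digits_alt number
instance (number : Int) (out : Int) : Decidable (Spec_get_multiplied_digits number out) := by unfold Spec_get_multiplied_digits; infer_instance

-- ===== CLAIM (what is proved, stated in full; the proofs are below) =====
def Claim_equal_get_multiplied_digits : Prop := ∀ (number : Int), Dom_get_multiplied_digits number → Pre_get_multiplied_digits number → Spec_get_multiplied_digits number (get_multiplied_digits number)

-- ===== LEMMAS AND PROOFS =====

-- the digit values of m, most significant first (pvDig 0 = [0]), mirroring str(m)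
def pvDig (m : Nat) : List Nat :=
  if h : m < 10 then [m]
  else pvDig (m / 10) ++ [m % 10]
decreasing_by exact Nat.div_lt_self (by omega) (by omega)

theorem pvDig_small (m : Nat) (h : m < 10) : pvDig m = [m] := by
  rw [pvDig]; simp [h]

theorem pvDig_big (m : Nat) (h : ¬ m < 10) : pvDig m = pvDig (m / 10) ++ [m % 10] := by
  rw [pvDig]; simp [h]

theorem pvDig_ne_nil (m : Nat) : pvDig m ≠ [] := by
  by_cases h : m < 10
  · simp [pvDig_small m h]
  · simp [pvDig_big m h]

theorem pvDig_all_lt (m : Nat) : ∀ d ∈ pvDig m, d < 10 := by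
  induction m using Nat.strong_induction_on with
  | _ m ih =>
    by_cases h : m < 10
    · simp [pvDig_small m h]; omega
    · rw [pvDig_big m h]
      intro d hd
      rcases List.mem_append.mp hd with h1 | h1
      · exact ih (m / 10) (Nat.div_lt_self (by omega) (by omega)) d h1
      · simp at h1; omega

-- str(m) for a natural m lists the digit characters of pvDig m
theorem toDigitsCore_eq (f : Nat) : ∀ (m : Nat) (acc : List Char), m ≤ f →
    Nat.toDigitsCore 10 (f + 1) m acc = (pvDig m).map Nat.digitChar ++ acc := by
  induction f with
  | zero =>
    intro m acc hm
    interval_cases m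
    simp [Nat.toDigitsCore, pvDig_small 0 (by omega)]
  | succ f ih =>
    intro m acc hm
    rw [Nat.toDigitsCore]
    by_cases h : m / 10 = 0
    · have hm10 : m < 10 := by omega
      simp [h, pvDig_small m hm10, Nat.mod_eq_of_lt hm10]
    · have hrec : m / 10 ≤ f := by omega
      simp only [h, if_false]
      rw [ih (m / 10) _ hrec, pvDig_big m (by omega)]
      simp

theorem toChars_nat (m : Nat) : PySem.Int.toChars (m : Int) = (pvDig m).map Nat.digitChar := by
  have h1 : ¬ ((m : Int) < 0) := by omega
  have h2 : ((m : Int)).toNat = m := by omega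
  rw [PySem.Int.toChars]
  simp only [h1, if_false, h2]
  simpa [Nat.toDigits] using toDigitsCore_eq m m [] (le_refl m)

-- digitChar on d < 10 is an ASCII digit of value d
theorem digitChar_isDigit (d : Nat) (h : d < 10) : (Nat.digitChar d).isDigit = true := by
  interval_cases d <;> decide

theorem pvDigitVal_digitChar (d : Nat) (h : d < 10) : pvDigitVal (Nat.digitChar d) = (d : Int) := by
  interval_cases d <;> decide

-- the decimal value of a digit list
def pvVal (l : List Nat) : Nat := l.foldl (fun a d => 10 * a + d) 0

theorem pvVal_append (l : List Nat) (d : Nat) : pvVal (l ++ [d]) = 10 * pvVal l + d := by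
  simp [pvVal]

theorem pvVal_cons_zero (t : List Nat) : pvVal (0 :: t) = pvVal t := by
  simp [pvVal]

-- parsing the digit characters of a digit list yields its decimal value
theorem pvFoldl_map (l : List Nat) (hd : ∀ d ∈ l, d < 10) :
    (l.map Nat.digitChar).foldl (fun a c => 10 * a + pvDigitVal c) 0 = ((pvVal l : Nat) : Int) := by
  induction l using List.reverseRecOn with
  | nil => simp [pvVal]
  | append_singleton l d ih =>
    have hd' : ∀ e ∈ l, e < 10 := fun e he => hd e (List.mem_append.mpr (Or.inl he))
    have hdd : d < 10 := hd d (by simp)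
    rw [List.map_append, List.foldl_append, ih hd', pvVal_append]
    simp only [List.map_cons, List.map_nil, List.foldl_cons, List.foldl_nil,
      pvDigitVal_digitChar d hdd]
    push_cast
    ring

theorem pvParseDigits_map (l : List Nat) (hl : l ≠ []) (hd : ∀ d ∈ l, d < 10) :
    pvParseDigits? (l.map Nat.digitChar) = some ((pvVal l : Nat) : Int) := by
  have hall : (l.map Nat.digitChar).all Char.isDigit = true := by
    simp only [List.all_map, List.all_eq_true]
    intro d hdl
    exact digitChar_isDigit d (hd d hdl)
  have hne : l.map Nat.digitChar ≠ [] := by simpa using hl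
  rw [pvParseDigits?]
  simp only [hne, hall, and_true, ne_eq, not_false_iff, if_true, Option.some.injEq]
  exact pvFoldl_map l hd

theorem pvVal_pvDig (m : Nat) : pvVal (pvDig m) = m := by
  induction m using Nat.strong_induction_on with
  | _ m ih =>
    by_cases h : m < 10
    · simp [pvDig_small m h, pvVal]
    · rw [pvDig_big m h, pvVal_append, ih (m / 10) (Nat.div_lt_self (by omega) (by omega))]
      omega

theorem pvDig_lt_pow (m : Nat) : m < 10 ^ (pvDig m).length := by
  induction m using Nat.strong_induction_on with
  | _ m ih =>
    by_cases h : m < 10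
    · simpa [pvDig_small m h] using h
    · rw [pvDig_big m h]
      have := ih (m / 10) (Nat.div_lt_self (by omega) (by omega))
      simp only [List.length_append, List.length_cons, List.length_nil]
      rw [pow_succ]
      omega

theorem pvDig_length_le (e : Nat) : ∀ m : Nat, m < 10 ^ (e + 1) → (pvDig m).length ≤ e + 1 := by
  induction e with
  | zero =>
    intro m hm
    rw [pow_one] at hm
    simp [pvDig_small m hm]
  | succ e ih =>
    intro m hm
    by_cases h : m < 10
    · simp [pvDig_small m h]
    · rw [pvDig_big m h]
      have hdiv : m / 10 < 10 ^ (e + 1) := by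
        rw [Nat.div_lt_iff_lt_mul (by omega)]
        calc m < 10 ^ (e + 1 + 1) := hm
        _ = 10 ^ (e + 1) * 10 := by ring
      have := ih (m / 10) hdiv
      simp only [List.length_append, List.length_cons, List.length_nil]
      omega

theorem pvVal_lt_pow (l : List Nat) (hd : ∀ d ∈ l, d < 10) : pvVal l < 10 ^ l.length := by
  induction l using List.reverseRecOn with
  | nil => simp [pvVal]
  | append_singleton l d ih =>
    have hd' : ∀ e ∈ l, e < 10 := fun e he => hd e (List.mem_append.mpr (Or.inl he))
    have hdd : d < 10 := hd d (by simp)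
    rw [pvVal_append]
    have := ih hd'
    simp only [List.length_append, List.length_cons, List.length_nil]
    rw [pow_succ]
    omega

theorem foldl_val_acc_le (t : List Nat) : ∀ a : Nat, a ≤ t.foldl (fun a d => 10 * a + d) a := by
  induction t with
  | nil => intro a; simp
  | cons d t ih =>
    intro a
    calc a ≤ 10 * a + d := by omega
    _ ≤ t.foldl (fun a d => 10 * a + d) (10 * a + d) := ih _
    _ = (d :: t).foldl (fun a d => 10 * a + d) a := by simp

theorem pvVal_cons_pos (h : Nat) (t : List Nat) (hh : h ≠ 0) : 1 ≤ pvVal (h :: t) := by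
  have : h ≤ pvVal (h :: t) := by
    simpa [pvVal] using foldl_val_acc_le t h
  omega

-- pvDig inverts pvVal on digit lists with a nonzero leading digit
theorem pvDig_pvVal (h : Nat) (t : List Nat) (hh : h ≠ 0) (hd : ∀ d ∈ h :: t, d < 10) :
    pvDig (pvVal (h :: t)) = h :: t := by
  induction t using List.reverseRecOn with
  | nil =>
    have : h < 10 := hd h (by simp)
    simp [pvVal, pvDig_small h this]
  | append_singleton t d ih =>
    have hd' : ∀ e ∈ h :: t, e < 10 := by
      intro e he
      apply hd
      rcases List.mem_cons.mp he with h1 | h1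
      · simp [h1]
      · simp [List.mem_append.mpr (Or.inl h1)]
    have hdd : d < 10 := hd d (by simp)
    have hcons : h :: (t ++ [d]) = (h :: t) ++ [d] := by simp
    rw [hcons, pvVal_append]
    have hv : 1 ≤ pvVal (h :: t) := pvVal_cons_pos h t hh
    have hbig : ¬ (10 * pvVal (h :: t) + d < 10) := by omega
    rw [pvDig_big _ hbig]
    have h1 : (10 * pvVal (h :: t) + d) / 10 = pvVal (h :: t) := by omega
    have h2 : (10 * pvVal (h :: t) + d) % 10 = d := by omega
    rw [h1, h2, ih hd']

-- the product of the nonzero entries of a digit list, and its arithmetic twin pvNz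
def pvProd (l : List Nat) : Int := l.foldl (fun (a : Int) (d : Nat) => if d = 0 then a else a * (d : Int)) 1

def pvNz (m : Nat) : Int :=
  if h : m = 0 then 1
  else (if m % 10 = 0 then 1 else ((m % 10 : Nat) : Int)) * pvNz (m / 10)
decreasing_by exact Nat.div_lt_self (by omega) (by omega)

theorem pvNz_zero : pvNz 0 = 1 := by rw [pvNz]; simp

theorem pvNz_pos (m : Nat) (h : m ≠ 0) :
    pvNz m = (if m % 10 = 0 then 1 else ((m % 10 : Nat) : Int)) * pvNz (m / 10) := by
  rw [pvNz]; simp [h]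

theorem pvProd_append (l : List Nat) (d : Nat) :
    pvProd (l ++ [d]) = if d = 0 then pvProd l else pvProd l * (d : Int) := by
  by_cases h : d = 0 <;> simp [pvProd, h]

theorem pvProd_cons_zero (t : List Nat) : pvProd (0 :: t) = pvProd t := by
  simp [pvProd]

theorem pvProd_factor (l : List Nat) :
    ∀ a c : Int, l.foldl (fun (a : Int) (d : Nat) => if d = 0 then a else a * (d : Int)) (c * a) =
      c * l.foldl (fun (a : Int) (d : Nat) => if d = 0 then a else a * (d : Int)) a := by
  induction l with
  | nil => intro a c; simp
  | cons d l ih =>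
    intro a c
    simp only [List.foldl_cons]
    by_cases h : d = 0
    · rw [if_pos h, if_pos h]
      exact ih a c
    · rw [if_neg h, if_neg h, mul_assoc]
      exact ih (a * (d : Int)) c

theorem pvProd_cons (h : Nat) (t : List Nat) (hh : h ≠ 0) :
    pvProd (h :: t) = (h : Int) * pvProd t := by
  have h1 : pvProd (h :: t) =
      t.foldl (fun (a : Int) (d : Nat) => if d = 0 then a else a * (d : Int)) ((h : Int) * 1) := by
    simp only [pvProd, List.foldl_cons, if_neg hh, one_mul, mul_one]
  rw [h1, pvProd_factor]
  rfl

theorem pvNz_eq_pvProd (m : Nat) : pvNz m = pvProd (pvDig m) := by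
  induction m using Nat.strong_induction_on with
  | _ m ih =>
    by_cases h : m < 10
    · by_cases h0 : m = 0
      · subst h0; simp [pvNz_zero, pvDig_small 0 (by omega), pvProd]
      · rw [pvNz_pos m h0, pvDig_small m h, Nat.mod_eq_of_lt h, Nat.div_eq_of_lt h, pvNz_zero]
        by_cases hz : m = 0
        · omega
        · simp [pvProd, hz, h0]
    · rw [pvNz_pos m (by omega), pvDig_big m h, pvProd_append,
        ih (m / 10) (Nat.div_lt_self (by omega) (by omega))]
      by_cases hz : m % 10 = 0
      · simp [hz]
      · simp [hz, mul_comm]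

-- re-parsing a digit tail and re-printing it drops its leading zeros; the nonzero-digit
-- product is unchanged
theorem pvProd_pvDig_pvVal (t : List Nat) (hne : t ≠ []) (hd : ∀ d ∈ t, d < 10) :
    pvProd (pvDig (pvVal t)) = pvProd t := by
  induction t with
  | nil => exact absurd rfl hne
  | cons d t ih =>
    rcases List.eq_nil_or_concat t with h0 | h0
    · subst h0
      have hdd : d < 10 := hd d (by simp)
      simp [pvVal, pvDig_small d hdd]
    · have htne : t ≠ [] := by rcases h0 with ⟨l, e, rfl⟩; simp
      have hd' : ∀ e ∈ t, e < 10 := fun e he => hd e (List.mem_cons.mpr (Or.inr he))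
      by_cases hz : d = 0
      · subst hz
        rw [pvVal_cons_zero, pvProd_cons_zero]
        exact ih htne hd'
      · rw [pvDig_pvVal d t hz hd]

theorem pvDig_head_ne_zero (m : Nat) (hm : m ≠ 0) (h : Nat) (t : List Nat)
    (he : pvDig m = h :: t) : h ≠ 0 := by
  induction m using Nat.strong_induction_on generalizing h t with
  | _ m ih =>
    by_cases hlt : m < 10
    · rw [pvDig_small m hlt] at he
      cases he
      exact hm
    · rw [pvDig_big m hlt] at he
      rcases List.exists_cons_of_ne_nil (pvDig_ne_nil (m / 10)) with ⟨h', t', he'⟩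
      rw [he'] at he
      simp only [List.cons_append, List.cons.injEq] at he
      rcases he with ⟨rfl, _⟩
      exact ih (m / 10) (Nat.div_lt_self (by omega) (by omega)) (by omega) h' t' he'

-- A computes the nonzero-digit product: by induction on the fuel
theorem pvGetA_eq (f : Nat) : ∀ m : Nat, m < 10 ^ (f + 1) → pvGetA (f + 1) (m : Int) = pvNz m := by
  induction f with
  | zero =>
    intro m hm
    rw [pow_one] at hm
    rw [pvGetA, toChars_nat m, pvDig_small m hm]
    have hp : PySem.List.pyGet? [Nat.digitChar m] 0 = some (Nat.digitChar m) := by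
      simp [PySem.List.pyGet?, PySem.List.pyIdx?]
    have hparse : pvParseDigits? [Nat.digitChar m] = some ((pvVal [m] : Nat) : Int) :=
      pvParseDigits_map [m] (by simp) (by simpa using hm)
    have hvm : pvVal [m] = m := by simp [pvVal]
    have hlen : ¬ ((1 : Int) < PySem.List.len [Nat.digitChar m]) := by
      simp [PySem.List.len_eq]
    simp only [List.map_cons, List.map_nil, hp, hparse, hvm, hlen, if_false]
    by_cases hz : m = 0
    · subst hz; simp [pvNz_zero]
    · have hne : ((m : Nat) : Int) ≠ 0 := by exact_mod_cast hz
      simp only [hne, ne_eq, not_false_iff, if_true]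
      rw [pvNz_pos m hz, Nat.mod_eq_of_lt hm, Nat.div_eq_of_lt hm, pvNz_zero, mul_one]
      simp [hz]
  | succ f ih =>
    intro m hm
    rw [pvGetA, toChars_nat m]
    rcases List.exists_cons_of_ne_nil (pvDig_ne_nil m) with ⟨h, t, he⟩
    have hall : ∀ d ∈ h :: t, d < 10 := he ▸ pvDig_all_lt m
    have hh10 : h < 10 := hall h (by simp)
    rw [he]
    have hp : PySem.List.pyGet? ((h :: t).map Nat.digitChar) 0 = some (Nat.digitChar h) := by
      simp [PySem.List.pyGet?, PySem.List.pyIdx?]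
    have hparse : pvParseDigits? [Nat.digitChar h] = some ((pvVal [h] : Nat) : Int) :=
      pvParseDigits_map [h] (by simp) (by simpa using hh10)
    have hvh : pvVal [h] = h := by simp [pvVal]
    rcases List.eq_nil_or_concat t with ht | ht
    · -- a single digit: t = [], so m = h < 10
      subst ht
      have hmh : m = h := by
        have := pvVal_pvDig m
        rw [he] at this
        simpa [pvVal] using this.symm
      have hlen : ¬ ((1 : Int) < PySem.List.len ((h :: ([] : List Nat)).map Nat.digitChar)) := by
        simp [PySem.List.len_eq]
      simp only [List.map_cons, List.map_nil] at hp hlen ⊢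
      simp only [hp, hparse, hvh, hlen, if_false]
      by_cases hz : h = 0
      · have : m = 0 := by omega
        subst this
        simp [hz, pvNz_zero]
      · have hne : ((h : Nat) : Int) ≠ 0 := by exact_mod_cast hz
        simp only [hne, ne_eq, not_false_iff, if_true]
        have hm10 : m < 10 := by omega
        rw [pvNz_pos m (by omega), Nat.mod_eq_of_lt hm10, Nat.div_eq_of_lt hm10, pvNz_zero,
          mul_one, hmh]
        simp [hz]
    · -- at least two digits: m ≥ 10, A recurses on the re-parsed tail
      have htne : t ≠ [] := by rcases ht with ⟨l, e, rfl⟩; simp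
      have hall' : ∀ d ∈ t, d < 10 := fun d hd => hall d (List.mem_cons.mpr (Or.inr hd))
      have hlen : (1 : Int) < PySem.List.len ((h :: t).map Nat.digitChar) := by
        rw [PySem.List.len_eq]
        rcases List.exists_cons_of_ne_nil htne with ⟨x, t', rfl⟩
        simp
      have hslice : PySem.List.slice ((h :: t).map Nat.digitChar) (some 1) none =
          t.map Nat.digitChar := by
        rw [PySem.List.slice_from_one]
        simp
      have hparse2 : pvParseDigits? (t.map Nat.digitChar) = some ((pvVal t : Nat) : Int) :=
        pvParseDigits_map t htne hall'
      simp only [List.map_cons] at hp hlen hslice ⊢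
      simp only [hp, hparse, hvh, hlen, if_true, hslice, hparse2]
      -- the recursive value is small enough for the induction hypothesis
      have hlenle : (pvDig m).length ≤ f + 2 := pvDig_length_le (f + 1) m hm
      have htlen : t.length ≤ f + 1 := by
        rw [he] at hlenle
        simpa using hlenle
      have hrec : pvVal t < 10 ^ (f + 1) := by
        calc pvVal t < 10 ^ t.length := pvVal_lt_pow t hall'
        _ ≤ 10 ^ (f + 1) := Nat.pow_le_pow_right (by omega) htlen
      rw [ih (pvVal t) hrec]
      -- h is the nonzero leading digit of m
      have hm0 : m ≠ 0 := by
        intro h0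
        subst h0
        rw [pvDig_small 0 (by omega)] at he
        cases he
        exact htne rfl
      have hh0 : h ≠ 0 := pvDig_head_ne_zero m hm0 h t he
      rw [pvNz_eq_pvProd, pvNz_eq_pvProd, pvProd_pvDig_pvVal t htne hall', he,
        pvProd_cons h t hh0]

-- B computes the same product: by induction on the loop variable
theorem pvAltGo_eq (m : Nat) : ∀ p : Int, pvAltGo (m : Int) p = p * pvNz m := by
  induction m using Nat.strong_induction_on with
  | _ m ih =>
    intro p
    rw [pvAltGo]
    by_cases h : m = 0
    · subst h; simp [pvNz_zero]
    · have hpos : (0 : Int) < (m : Int) := by exact_mod_cast Nat.pos_of_ne_zero h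
      simp only [hpos, dif_pos]
      rw [show PySem.Int.floordiv (m : Int) 10 = ((m / 10 : Nat) : Int) from
          by exact_mod_cast PySem.Int.floordiv_natCast m 10,
        show PySem.Int.mod (m : Int) 10 = ((m % 10 : Nat) : Int) from
          by exact_mod_cast PySem.Int.mod_natCast m 10]
      rw [ih (m / 10) (Nat.div_lt_self (by omega) (by omega))]
      rw [pvNz_pos m h]
      by_cases hz : m % 10 = 0
      · simp [hz]
      · have : ((m % 10 : Nat) : Int) ≠ 0 := by exact_mod_cast hz
        simp only [this, ne_eq, not_false_iff, if_true, hz, if_false]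
        ring

-- ===== VERDICT (by name: the statement is the Claim_ definition above) =====
theorem get_multiplied_digits_spec : Claim_equal_get_multiplied_digits := by
  unfold Claim_equal_get_multiplied_digits
  intro number _ hpre
  unfold Spec_get_multiplied_digits Pre_get_multiplied_digits at *
  obtain ⟨m, rfl⟩ : ∃ m : Nat, number = (m : Int) := ⟨number.toNat, by omega⟩
  rw [get_multiplied_digits, get_multiplied_digits_alt, pvAltGo_eq m 1, one_mul]
  rw [toChars_nat m]
  have hlen : (pvDig m).length = ((pvDig m).length - 1) + 1 := by
    have := pvDig_ne_nil m
    have : 0 < (pvDig m).length := List.length_pos_iff.mpr this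
    omega
  rw [List.length_map, hlen]
  apply pvGetA_eq
  rw [← hlen]
  exact pvDig_lt_pow m
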